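-- pv_equiv track=rewrite | github.com/Shivam-baghel/Python_Scaler | Advance/29. Queues-1/Homework/Q1. N integers containing only 1 & 2.py | findAthNumberInSeries
-- ===== SOURCE A (Python) =====
-- from collections import deque
--
-- def findAthNumberInSeries(number:int):
--     queue = deque()
--     queue.append('1')
--     queue.append('2')
--
--     for i in range(1,number):
--         element = queue[0]
--         queue.popleft()
--         queue.append(element+"1")
--         queue.append(element+"2")
--
--     return queue[0]
-- ===== SOURCE B (Python) =====
-- def findAthNumberInSeries(number: int):
--     # Nth term of the series 1,2,11,12,21,22,... is the bijective base-2
--     # numeral of N over the digits {1,2}, built from least significant digit up.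
--     digits = []
--     while number > 0:
--         number -= 1
--         digits.append('1' if number % 2 == 0 else '2')
--         number //= 2
--     return ''.join(reversed(digits))
-- ===== Notes on version B (the rewrite author's own statement) =====
-- stated objective: faster
-- what changed: Replaces the O(n) BFS queue generation of the whole series prefix by direct bijective base-2 digit extraction of the index (O(log n) divmod loop).
-- outside the precondition, e.g. on findAthNumberInSeries(0): A returns '1', B returns ''; on findAthNumberInSeries(-3): A returns '1', B returns ''
import Mathlib
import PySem

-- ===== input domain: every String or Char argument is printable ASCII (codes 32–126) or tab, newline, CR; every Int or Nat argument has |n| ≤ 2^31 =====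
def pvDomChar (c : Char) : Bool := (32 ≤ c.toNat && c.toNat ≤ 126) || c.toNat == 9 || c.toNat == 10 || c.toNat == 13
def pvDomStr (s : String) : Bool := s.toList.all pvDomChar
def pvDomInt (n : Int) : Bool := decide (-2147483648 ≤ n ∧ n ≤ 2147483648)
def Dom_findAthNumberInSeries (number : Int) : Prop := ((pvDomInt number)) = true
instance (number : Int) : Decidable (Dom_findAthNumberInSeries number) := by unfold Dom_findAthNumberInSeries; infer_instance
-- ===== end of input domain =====

-- B replaces A's O(n) BFS queue generation by bijective base-2 digit extraction of the index.


-- ===== PORT A =====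
-- for i in range(1, number): pop head, append head+"1", head+"2"; return queue[0]
def findAthNumberInSeries (number : Int) : String :=
  let queue : List String := ["1", "2"]
  let queue := (PySem.List.pyRange 1 number 1).foldl
    (fun q _ =>
      let element := (PySem.List.pyGet? q 0).getD ""   -- queue[0]; the queue is never empty
      (q.drop 1) ++ [element ++ "1", element ++ "2"]) queue
  (PySem.List.pyGet? queue 0).getD ""

-- ===== PORT B =====
-- while number > 0: number -= 1; digits.append('1' if number % 2 == 0 else '2'); number //= 2
def pvAltLoop (number : Int) (digits : List String) : List String :=
  if _h : number > 0 then
    let n := number - 1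
    pvAltLoop (PySem.Int.floordiv n 2)
      (digits ++ [if PySem.Int.mod n 2 = 0 then "1" else "2"])
  else digits
termination_by number.toNat
decreasing_by
  rw [PySem.Int.floordiv_eq_ediv_of_pos (by omega : (0:Int) < 2)]
  omega

def findAthNumberInSeries_alt (number : Int) : String :=
  PySem.Str.join "" (pvAltLoop number []).reverse

-- ===== PRECONDITION & SPEC =====
-- Pre_ excludes non-positive indices: an out-of-range query into the one-based series,
-- for which no return value is specified (there A still returns the first series element,
-- B returns the empty string; see the cited excluded examples).
def Pre_findAthNumberInSeries (number : Int) : Prop := 1 ≤ number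
instance (number : Int) : Decidable (Pre_findAthNumberInSeries number) := by unfold Pre_findAthNumberInSeries; infer_instance
def pvWitness_findAthNumberInSeries : Int := 3

def Spec_findAthNumberInSeries (number : Int) (out : String) : Prop := out = findAthNumberInSeries_alt number
instance (number : Int) (out : String) : Decidable (Spec_findAthNumberInSeries number out) := by unfold Spec_findAthNumberInSeries; infer_instance

-- ===== CLAIM (what is proved, stated in full; the proofs are below) =====
def Claim_equal_findAthNumberInSeries : Prop := ∀ (number : Int), Dom_findAthNumberInSeries number → Pre_findAthNumberInSeries number → Spec_findAthNumberInSeries number (findAthNumberInSeries number)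

-- ===== LEMMAS AND PROOFS =====

-- the series: pvSeq n is the n-th string of 1s and 2s (bijective base-2), pvSeq 0 = ""
def pvSeq : Nat → String
  | 0 => ""
  | n + 1 => pvSeq (n / 2) ++ (if n % 2 = 0 then "1" else "2")
decreasing_by exact Nat.lt_succ_of_le (Nat.div_le_self n 2)

-- digits of B's loop, least significant first
def pvTail : Nat → List String
  | 0 => []
  | n + 1 => (if n % 2 = 0 then "1" else "2") :: pvTail (n / 2)
decreasing_by exact Nat.lt_succ_of_le (Nat.div_le_self n 2)

theorem pvStr_ext {s t : String} (h : s.toList = t.toList) : s = t := by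
  have h2 := congrArg String.ofList h
  simpa using h2

theorem pvGet_cons_zero {α : Type} (x : α) (l : List α) :
    PySem.List.pyGet? (x :: l) 0 = some x := by
  simp [PySem.List.pyGet?, PySem.List.pyIdx?]

theorem pvCharsJoin_flatten : ∀ (l : List (List Char)), PySem.Chars.join [] l = l.flatten
  | [] => by simp [PySem.Chars.join_nil]
  | [p] => by simp [PySem.Chars.join_singleton]
  | p :: q :: rest => by
      rw [PySem.Chars.join_cons_cons, pvCharsJoin_flatten (q :: rest)]
      simp

theorem pvJoin_append_singleton (xs : List String) (d : String) :
    PySem.Str.join "" (xs ++ [d]) = PySem.Str.join "" xs ++ d := by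
  apply pvStr_ext
  simp [PySem.Str.toList_join, pvCharsJoin_flatten]

theorem pvAltLoop_eq (k : Nat) : ∀ digits, pvAltLoop (k : Int) digits = digits ++ pvTail k := by
  induction k using Nat.strong_induction_on with
  | _ k ih =>
    intro digits
    match k with
    | 0 => rw [pvAltLoop]; simp [pvTail]
    | m + 1 =>
      rw [pvAltLoop]
      rw [dif_pos (by exact_mod_cast Nat.succ_pos m)]
      have h1 : ((m + 1 : Nat) : Int) - 1 = (m : Int) := by push_cast; ring
      rw [h1]
      have hmod : (PySem.Int.mod (m : Int) 2 = 0) ↔ (m % 2 = 0) := by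
        rw [PySem.Int.mod_eq_emod_of_pos (by omega)]; omega
      have hfd : PySem.Int.floordiv (m : Int) 2 = ((m / 2 : Nat) : Int) := by
        rw [PySem.Int.floordiv_eq_ediv_of_pos (by omega)]
        omega
      show pvAltLoop (PySem.Int.floordiv (↑m) 2)
          (digits ++ [if PySem.Int.mod (↑m) 2 = 0 then "1" else "2"]) = digits ++ pvTail (m + 1)
      rw [hfd, ih (m / 2) (by omega)]
      have hd : (if PySem.Int.mod (m : Int) 2 = 0 then "1" else "2")
          = (if m % 2 = 0 then "1" else "2") := by
        by_cases hm : m % 2 = 0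
        · rw [if_pos (hmod.mpr hm), if_pos hm]
        · rw [if_neg (fun hc => hm (hmod.mp hc)), if_neg hm]
      rw [hd]
      show digits ++ [if m % 2 = 0 then "1" else "2"] ++ pvTail (m / 2)
          = digits ++ pvTail (m + 1)
      rw [pvTail]
      simp

theorem pvJoin_tail (k : Nat) : PySem.Str.join "" (pvTail k).reverse = pvSeq k := by
  induction k using Nat.strong_induction_on with
  | _ k ih =>
    match k with
    | 0 =>
      rw [pvTail, pvSeq]
      apply pvStr_ext
      simp [PySem.Str.toList_join]
    | m + 1 =>
      rw [pvTail, pvSeq]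
      simp only [List.reverse_cons]
      rw [pvJoin_append_singleton, ih (m / 2) (by omega)]

theorem pvAlt_eq_seq (n : Int) (h : 0 ≤ n) : findAthNumberInSeries_alt n = pvSeq n.toNat := by
  unfold findAthNumberInSeries_alt
  have hn : n = ((n.toNat : Nat) : Int) := (Int.toNat_of_nonneg h).symm
  rw [hn, pvAltLoop_eq n.toNat]
  simp only [List.nil_append, Int.toNat_natCast]
  exact pvJoin_tail n.toNat

-- A-side: the queue after i iterations holds pvSeq (i+1), …, pvSeq (2i+2)
def pvState (i : Nat) : List String := (List.range' (i + 1) (i + 2)).map pvSeq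

def pvStep (q : List String) : List String :=
  let element := (PySem.List.pyGet? q 0).getD ""
  (q.drop 1) ++ [element ++ "1", element ++ "2"]

theorem pvSeq_odd (i : Nat) : pvSeq (2 * i + 3) = pvSeq (i + 1) ++ "1" := by
  rw [show 2 * i + 3 = (2 * i + 2) + 1 from rfl, pvSeq]
  have h1 : (2 * i + 2) / 2 = i + 1 := by omega
  have h2 : (2 * i + 2) % 2 = 0 := by omega
  rw [h1, h2]
  simp

theorem pvSeq_even (i : Nat) : pvSeq (2 * i + 4) = pvSeq (i + 1) ++ "2" := by
  rw [show 2 * i + 4 = (2 * i + 3) + 1 from rfl, pvSeq]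
  have h1 : (2 * i + 3) / 2 = i + 1 := by omega
  have h2 : (2 * i + 3) % 2 = 1 := by omega
  rw [h1, h2]
  simp

theorem pvStep_state (i : Nat) : pvStep (pvState i) = pvState (i + 1) := by
  have hr2 : List.range' (2 * i + 3) 2 = [2 * i + 3, 2 * i + 4] := by
    rw [show (2 : Nat) = 1 + 1 from rfl, List.range'_succ, show (1 : Nat) = 0 + 1 from rfl,
      List.range'_succ, List.range'_zero]
  have hr : List.range' (i + 2) (i + 3) = List.range' (i + 2) (i + 1) ++ [2 * i + 3, 2 * i + 4] := by
    rw [← hr2, show 2 * i + 3 = i + 2 + 1 * (i + 1) from by ring, List.range'_append]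
  unfold pvStep pvState
  rw [show i + 1 + 1 = i + 2 from rfl, show i + 1 + 2 = i + 3 from rfl, hr]
  rw [List.range'_succ, List.map_cons, pvGet_cons_zero]
  simp only [Option.getD_some, List.drop_succ_cons, List.drop_zero, List.map_append,
    List.map_cons, List.map_nil]
  rw [pvSeq_odd, pvSeq_even]

theorem pvFoldl_const {α : Type} (l : List α) (q : List String) :
    l.foldl (fun q _ => pvStep q) q = pvStep^[l.length] q := by
  induction l generalizing q with
  | nil => rfl
  | cons x l ih => simp [List.foldl_cons, ih, Function.iterate_succ_apply]

theorem pvIterate_state (k : Nat) : pvStep^[k] (pvState 0) = pvState k := by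
  induction k with
  | zero => rfl
  | succ m ih => rw [Function.iterate_succ_apply', ih, pvStep_state]

theorem pvState_zero : pvState 0 = ["1", "2"] := by
  unfold pvState
  have hs1 : pvSeq 1 = "1" := by
    rw [show (1 : Nat) = 0 + 1 from rfl, pvSeq, pvSeq]
    rfl
  have hs2 : pvSeq 2 = "2" := by
    rw [show (2 : Nat) = 1 + 1 from rfl, pvSeq, pvSeq]
    rfl
  simp [List.range'_succ, hs1, hs2]

theorem pvA_eq_seq (n : Int) (h : 1 ≤ n) : findAthNumberInSeries n = pvSeq n.toNat := by
  show (PySem.List.pyGet? ((PySem.List.pyRange 1 n 1).foldl (fun q _ => pvStep q) ["1", "2"]) 0).getD "" = _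
  rw [pvFoldl_const, PySem.List.length_pyRange_one, ← pvState_zero, pvIterate_state]
  unfold pvState
  rw [List.range'_succ, List.map_cons, pvGet_cons_zero]
  simp only [Option.getD_some]
  congr 1
  omega

-- ===== VERDICT (by name: the statement is the Claim_ definition above) =====
theorem findAthNumberInSeries_spec : Claim_equal_findAthNumberInSeries := by
  intro number _ hpre
  have h1 : 1 ≤ number := hpre
  unfold Spec_findAthNumberInSeries
  rw [pvA_eq_seq number h1, pvAlt_eq_seq number (by omega)]
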